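-- pv_equiv track=rewrite | github.com/AnupPainuly/CodeHumour | gfg_solutions/split_string.py | splitString
-- ===== SOURCE A (Python) =====
-- def splitString(s):
--     res = []
--     alpha, num, spec = '', '', ''
--     for i in s:
--         if i.isalpha():
--             alpha += i
--         elif i.isdigit():
--             num += i
--         else:
--             spec += i
--     res.append(alpha)
--     res.append(num)
--     res.append(spec)
--     return res
-- ===== SOURCE B (Python) =====
-- def splitString(s):
--     alpha = ''.join(c for c in s if c.isalpha())
--     num = ''.join(c for c in s if c.isdigit())
--     spec = ''.join(c for c in s if not c.isalpha() and not c.isdigit())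
--     return [alpha, num, spec]
-- ===== Notes on version B (the rewrite author's own statement) =====
-- stated objective: simpler
-- what changed: Replaces the single if/elif/else accumulation loop over three string accumulators with three independent filtering passes (generator + ''.join), one per bucket.
import Mathlib
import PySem

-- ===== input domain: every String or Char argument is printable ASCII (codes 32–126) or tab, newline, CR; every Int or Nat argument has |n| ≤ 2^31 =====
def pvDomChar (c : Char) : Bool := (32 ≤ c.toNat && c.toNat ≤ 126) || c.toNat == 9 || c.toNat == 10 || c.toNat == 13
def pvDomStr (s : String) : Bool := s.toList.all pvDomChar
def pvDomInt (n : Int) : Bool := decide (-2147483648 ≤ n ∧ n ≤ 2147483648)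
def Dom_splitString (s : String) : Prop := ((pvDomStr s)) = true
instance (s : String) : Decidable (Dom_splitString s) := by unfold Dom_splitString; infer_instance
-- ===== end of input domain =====

-- B replaces A's single if/elif/else accumulation loop with three independent filtering passes, one per bucket (simpler decomposition, same O(n) cost).


-- ===== PORT A =====
-- single left-to-right loop, three string accumulators, if/elif/else
def splitString (s : String) : List String :=
  let st := s.toList.foldl
    (fun (acc : List Char × List Char × List Char) i =>
      if PySem.Chars.isalpha i then (acc.1 ++ [i], acc.2.1, acc.2.2)
      else if PySem.Chars.isdigit i then (acc.1, acc.2.1 ++ [i], acc.2.2)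
      else (acc.1, acc.2.1, acc.2.2 ++ [i]))
    ([], [], [])
  [String.ofList st.1, String.ofList st.2.1, String.ofList st.2.2]

-- ===== PORT B =====
-- three independent filtering passes
def splitString_alt (s : String) : List String :=
  [String.ofList (s.toList.filter PySem.Chars.isalpha),
   String.ofList (s.toList.filter PySem.Chars.isdigit),
   String.ofList (s.toList.filter (fun c => !PySem.Chars.isalpha c && !PySem.Chars.isdigit c))]

-- ===== PRECONDITION & SPEC =====
def Spec_splitString (s : String) (out : List String) : Prop := out = splitString_alt s
instance (s : String) (out : List String) : Decidable (Spec_splitString s out) := by unfold Spec_splitString; infer_instance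

-- ===== CLAIM (what is proved, stated in full; the proofs are below) =====
def Claim_equal_splitString : Prop := ∀ (s : String), Dom_splitString s → Spec_splitString s (splitString s)

-- ===== LEMMAS AND PROOFS =====

-- alphabetic characters are never digits (true for all Char under PySem's definitions)
theorem alpha_not_digit (c : Char) (h : PySem.Chars.isalpha c) : PySem.Chars.isdigit c = false := by
  simp only [PySem.Chars.isalpha, PySem.Chars.isupper, PySem.Chars.islower, PySem.Chars.isdigit,
    Bool.or_eq_true, Bool.and_eq_true, decide_eq_true_eq] at h ⊢
  simp only [Bool.and_eq_false_iff, decide_eq_false_iff_not]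
  simp only [Char.le_def, UInt32.le_iff_toNat_le, Char.reduceVal, UInt32.reduceToNat] at *
  omega

-- loop invariant of A's fold: it appends the three filters to the running accumulators
theorem splitString_fold_inv (l : List Char) (a n sp : List Char) :
    l.foldl
      (fun (acc : List Char × List Char × List Char) i =>
        if PySem.Chars.isalpha i then (acc.1 ++ [i], acc.2.1, acc.2.2)
        else if PySem.Chars.isdigit i then (acc.1, acc.2.1 ++ [i], acc.2.2)
        else (acc.1, acc.2.1, acc.2.2 ++ [i]))
      (a, n, sp)
    = (a ++ l.filter PySem.Chars.isalpha,
       n ++ l.filter (fun c => !PySem.Chars.isalpha c && PySem.Chars.isdigit c),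
       sp ++ l.filter (fun c => !PySem.Chars.isalpha c && !PySem.Chars.isdigit c)) := by
  induction l generalizing a n sp with
  | nil => simp
  | cons c t ih =>
    by_cases hα : PySem.Chars.isalpha c
    · simp [hα, ih, List.append_assoc]
    · by_cases hδ : PySem.Chars.isdigit c
      · simp [hα, hδ, ih, List.append_assoc]
      · simp [hα, hδ, ih, List.append_assoc]

-- A's elif-digit filter equals B's plain digit filter, since alpha and digit are disjoint
theorem elif_filter_eq (l : List Char) :
    l.filter (fun c => !PySem.Chars.isalpha c && PySem.Chars.isdigit c)
    = l.filter PySem.Chars.isdigit := by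
  apply List.filter_congr
  intro c _
  by_cases hα : PySem.Chars.isalpha c
  · simp [hα, alpha_not_digit c hα]
  · simp [hα]

-- ===== VERDICT (by name: the statement is the Claim_ definition above) =====
theorem splitString_spec : Claim_equal_splitString := by
  intro s _
  unfold Spec_splitString splitString splitString_alt
  simp only [splitString_fold_inv, elif_filter_eq, List.nil_append]
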